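-- pv_equiv track=rewrite | github.com/matthewjackswann/Advent2021 | day17sol.py | calcXPos
-- ===== SOURCE A (Python) =====
-- def calcXPos(x, t):
--     d = 0
--     for i in range(t):
--         d += x
--         x -= 1
--         if x == 0:
--             return d
--     return d
-- ===== SOURCE B (Python) =====
-- def calcXPos(x, t):
--     # Closed form: arithmetic series instead of the step loop.
--     if t <= 0:
--         return 0
--     if 1 <= x <= t:
--         return x * (x + 1) // 2
--     return t * x - t * (t - 1) // 2
-- ===== Notes on version B (the rewrite author's own statement) =====
-- stated objective: faster
-- what changed: Replaced the t-step simulation loop (with early exit when the velocity hits 0) by an O(1) arithmetic-series closed form with casework on whether x reaches 0 within t steps.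
import Mathlib
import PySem

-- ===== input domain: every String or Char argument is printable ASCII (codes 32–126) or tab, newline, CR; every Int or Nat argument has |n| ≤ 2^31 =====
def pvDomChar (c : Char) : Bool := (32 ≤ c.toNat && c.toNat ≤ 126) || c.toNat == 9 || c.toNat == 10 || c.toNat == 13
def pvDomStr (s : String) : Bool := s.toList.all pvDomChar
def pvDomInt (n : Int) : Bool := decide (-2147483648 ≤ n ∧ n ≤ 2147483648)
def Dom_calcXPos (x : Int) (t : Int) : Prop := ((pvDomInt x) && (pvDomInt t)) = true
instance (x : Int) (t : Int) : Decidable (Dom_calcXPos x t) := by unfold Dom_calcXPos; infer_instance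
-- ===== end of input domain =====

-- B replaces A's O(t) step loop by an O(1) arithmetic-series closed form.

-- ===== PORT A =====
-- A's for-loop with early return, as structural recursion over the range counter.
def calcXPosLoop : Nat → Int → Int → Int
  | 0, _, d => d
  | n + 1, x, d =>
    let d' := d + x
    let x' := x - 1
    if x' = 0 then d' else calcXPosLoop n x' d'

def calcXPos (x : Int) (t : Int) : Int := calcXPosLoop t.toNat x 0

-- ===== PORT B =====
def calcXPos_alt (x : Int) (t : Int) : Int :=
  if t ≤ 0 then 0
  else if 1 ≤ x ∧ x ≤ t then PySem.Int.floordiv (x * (x + 1)) 2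
  else t * x - PySem.Int.floordiv (t * (t - 1)) 2

-- ===== PRECONDITION & SPEC =====
def Spec_calcXPos (x : Int) (t : Int) (out : Int) : Prop := out = calcXPos_alt x t
instance (x : Int) (t : Int) (out : Int) : Decidable (Spec_calcXPos x t out) := by unfold Spec_calcXPos; infer_instance

-- ===== CLAIM (what is proved, stated in full; the proofs are below) =====
def Claim_equal_calcXPos : Prop := ∀ (x : Int) (t : Int), Dom_calcXPos x t → Spec_calcXPos x t (calcXPos x t)

-- ===== LEMMAS AND PROOFS =====

-- m*(m+1)//2 = m + m*(m-1)//2 (the series identity used in both induction cases).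
theorem fd_tri_succ (m : Int) :
    PySem.Int.floordiv (m * (m + 1)) 2 = m + PySem.Int.floordiv (m * (m - 1)) 2 := by
  obtain ⟨k, hk⟩ := Int.even_mul_succ_self (m - 1)
  have h1 : m * (m - 1) = 2 * k := by linarith [hk]
  have h2 : m * (m + 1) = 2 * (k + m) := by nlinarith [hk]
  rw [h1, h2, PySem.Int.floordiv_eq_ediv_of_pos (by omega),
      PySem.Int.floordiv_eq_ediv_of_pos (by omega),
      Int.mul_ediv_cancel_left _ (by omega), Int.mul_ediv_cancel_left _ (by omega)]
  ring

theorem loop_eq (n : Nat) (x d : Int) :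
    calcXPosLoop n x d =
      if 1 ≤ x ∧ x ≤ (n : Int) then d + PySem.Int.floordiv (x * (x + 1)) 2
      else d + (n : Int) * x - PySem.Int.floordiv ((n : Int) * ((n : Int) - 1)) 2 := by
  induction n generalizing x d with
  | zero =>
    simp [calcXPosLoop]
    intro h1 h2; omega
  | succ n ih =>
    rw [calcXPosLoop]
    by_cases hx1 : x - 1 = 0
    · have hx : x = 1 := by omega
      subst hx
      push_cast
      simp only [true_and]
      rw [if_pos (show (1:Int) ≤ (n:Int) + 1 by omega)]
      norm_num [show PySem.Int.floordiv 2 2 = 1 from by decide]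
    · simp only [if_neg hx1, ih]
      by_cases hc : 1 ≤ x - 1 ∧ x - 1 ≤ (n : Int)
      · have hc' : 1 ≤ x ∧ x ≤ ((n : Nat) + 1 : Int) := ⟨by omega, by omega⟩
        rw [if_pos hc, if_pos (by push_cast; exact_mod_cast hc')]
        have := fd_tri_succ x
        have hx : x * (x - 1) = (x - 1) * ((x - 1) + 1) := by ring
        rw [hx] at this
        omega
      · have hc' : ¬ (1 ≤ x ∧ x ≤ ((n : Int) + 1)) := by omega
        rw [if_neg hc, if_neg (by push_cast; exact hc')]
        push_cast
        have h2 : ((n : Int) + 1) * ((n : Int) + 1 - 1) = (n : Int) * ((n : Int) + 1) := by ring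
        rw [h2, fd_tri_succ (n : Int)]
        ring

-- ===== VERDICT (by name: the statement is the Claim_ definition above) =====
theorem calcXPos_spec : Claim_equal_calcXPos := by
  intro x t _
  unfold Spec_calcXPos calcXPos calcXPos_alt
  by_cases ht : t ≤ 0
  · have : t.toNat = 0 := by omega
    simp [this, ht, calcXPosLoop]
  · have hcast : ((t.toNat : Nat) : Int) = t := by omega
    rw [if_neg ht, loop_eq, hcast]
    by_cases hc : 1 ≤ x ∧ x ≤ t
    · simp [hc]
    · rw [if_neg hc, if_neg hc]
      ring
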